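/-
  THE CONTRACTS OF THE SMALL ROUTINES OF libc (c/libc.c; design/CONTRACTS.md entries 91, 26, 36, 10): `memcmp`, `abs`, `malloc`,
  `free`. `Spec`s over the shadow layer only. Ghost parameters of every Spec: `others`, `frames` — the live objects of the
  shadow invariant (also for `abs`, `malloc`, `free`, which touch no memory but the slot of their return address: the statements
  are uniform, and a caller hands the layer through).

      function   own frame                                  callees (largest frame)             frame
      memcmp     6 pushes + sub rsp 8 = 56                  __asan_load1_noabort (16)    56 + 8 + 16 = 80
      abs        —                                          —                                          0
      malloc     —                                          —                                          0
      free       —                                          —                                          0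
-/
import Vorbis.Spec.Basic
namespace Vorbis.Spec
open X86 X86.User Asan

/-- **`memcmp(rdi = a, rsi = b, rdx = n)`** (CONTRACTS 91): `n = 0`, or the `n` bytes at `a` and the `n` bytes at `b` each lie
inside one live object. The loop compares byte by byte and leaves at the first difference with `eax = a[i] − b[i]` (two
zero-extended bytes, a 32-bit `sub`: not 0 when they differ), or after `n` equal bytes with `eax = 0`. So the low 32 bits of
rax are 0 EXACTLY WHEN the two ranges hold the same bytes — what the sole caller, `vorbis_validate` (`test eax, eax`), needs.
Nothing is written but its own 80 bytes of stack (six pushes, `sub rsp, 8`, the return address of its check calls, that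
routine's worst case); no shadow byte is written. -/
def memcmp.spec (others : List Obj) (frames : List (Nat × FrameLayout)) : Spec where
  pre u :=
    ShadowPre others frames u ∧
    ((u.reg .rdx).toNat = 0 ∨
      (LiveIn others frames (u.reg .rdi).toNat (u.reg .rdx).toNat ∧
       LiveIn others frames (u.reg .rsi).toNat (u.reg .rdx).toNat))
  post u v :=
    ShadowUntouched u.mem v.mem ∧
    ((v.reg .rax).toNat % 2 ^ 32 = 0 ↔
      ∀ i, i < (u.reg .rdx).toNat →
        u.mem.readLE (u.reg .rdi + UInt64.ofNat i) 1 = u.mem.readLE (u.reg .rsi + UInt64.ofNat i) 1)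
  frame := 80
  writes _ := []

@[vspec] theorem memcmp.spec_frame (others : List Obj) (frames : List (Nat × FrameLayout)) :
    (memcmp.spec others frames).frame = 80 := id rfl

@[vspec] theorem memcmp.spec_writes (others : List Obj) (frames : List (Nat × FrameLayout)) (u : State) :
    (memcmp.spec others frames).writes u = [] := id rfl

/-- **`abs(edi = x)`** (CONTRACTS 26): any `x`. `mov eax, edi ; test edi, edi ; js → neg eax ; ret`: the result is the 32-bit
value zero-extended into rax. With `x32` the low half of rdi as a number: `x32 < 2^31` (`x ≥ 0`) gives `x32`, otherwise
`2^32 − x32` (= `−x` as an unsigned 32-bit number; for `x = INT_MIN`, `x32 = 2^31`, this is `2^31` again: `neg` wraps, no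
fault). No memory access but the `ret`'s, no stack frame; no shadow byte is written. -/
def abs.spec (others : List Obj) (frames : List (Nat × FrameLayout)) : Spec where
  pre u :=
    ShadowPre others frames u
  post u v :=
    (v.reg .rax).toNat =
      (if (u.reg .rdi).toNat % 2 ^ 32 < 2 ^ 31 then (u.reg .rdi).toNat % 2 ^ 32 else 2 ^ 32 - (u.reg .rdi).toNat % 2 ^ 32) ∧
    ShadowUntouched u.mem v.mem
  frame := 0
  writes _ := []

@[vspec] theorem abs.spec_frame (others : List Obj) (frames : List (Nat × FrameLayout)) :
    (abs.spec others frames).frame = 0 := id rfl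

@[vspec] theorem abs.spec_writes (others : List Obj) (frames : List (Nat × FrameLayout)) (u : State) :
    (abs.spec others frames).writes u = [] := id rfl

/-- **`malloc(rdi = size)`** (CONTRACTS 36): any argument. `mov eax, 0 ; ret`: returns NULL (the 32-bit move zero-extends:
rax = 0). It exists only to link the decoder's no-arena path, which is dead (the driver always passes an arena). No memory
access but the `ret`'s, no stack frame; no shadow byte is written. -/
def malloc.spec (others : List Obj) (frames : List (Nat × FrameLayout)) : Spec where
  pre u :=
    ShadowPre others frames u
  post u v :=
    v.reg .rax = 0 ∧
    ShadowUntouched u.mem v.mem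
  frame := 0
  writes _ := []

@[vspec] theorem malloc.spec_frame (others : List Obj) (frames : List (Nat × FrameLayout)) :
    (malloc.spec others frames).frame = 0 := id rfl

@[vspec] theorem malloc.spec_writes (others : List Obj) (frames : List (Nat × FrameLayout)) (u : State) :
    (malloc.spec others frames).writes u = [] := id rfl

/-- **`free(rdi = p)`** (CONTRACTS 10): any argument. One instruction, `ret`: nothing happens (dead, as `malloc`). No stack
frame; no shadow byte is written. -/
def free.spec (others : List Obj) (frames : List (Nat × FrameLayout)) : Spec where
  pre u :=
    ShadowPre others frames u
  post u v :=
    ShadowUntouched u.mem v.mem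
  frame := 0
  writes _ := []

@[vspec] theorem free.spec_frame (others : List Obj) (frames : List (Nat × FrameLayout)) :
    (free.spec others frames).frame = 0 := id rfl

@[vspec] theorem free.spec_writes (others : List Obj) (frames : List (Nat × FrameLayout)) (u : State) :
    (free.spec others frames).writes u = [] := id rfl

end Vorbis.Spec
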